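-- pv_equiv track=rewrite | github.com/AlbertLin2288/sudoku | sudoku10j.py | make_boardr
-- ===== SOURCE A (Python) =====
-- def cal_col(row_num):
--     """calculate which rules num is in"""
--     rn = row_num//81
--     cn = row_num//9%9
--     nn = row_num%9
--     r1 = rn*9 + cn
--     r2 = rn*9 + nn + 81
--     r3 = cn*9 + nn + 162
--     r4 = rn//3*27 + cn//3*9 + nn + 243
--     return r1,r2,r3,r4
--
-- def cal_row(col):
--     """calculate which numbers rule col include"""
--     if col<81:
--         return (col*9+i for i in range(9))
--     col -= 81
--     if col<81:
--         con = col//9*81 + col%9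
--         return (con+i*9 for i in range(9))
--     col -= 81
--     if col<81:
--         return (col+81*i for i in range(9))
--     col -= 81
--     con = col//27*243+col//9%3*27+col%9
--     return (con+i//3*81+i%3*9 for i in range(9))
--
-- def make_boardr(moves):
--     """make a board based on moves(in row form)
--     return a turple of rows, columns, columns_head and board"""
--     rows = set(range(729))
--     columns = set(range(324))
--     columns_head = [9 for i in range(324)]
--     board = moves[:]
--     for nu in board:
--         rc = cal_col(nu)
--         for c in rc:
--             if c in columns:
--                 columns.remove(c)
--                 for r in cal_row(c):
--                     if r in rows:
--                         rows.remove(r)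
--                         for c3 in cal_col(r):
--                             columns_head[c3] -= 1
--     return rows, columns, columns_head, board
-- ===== SOURCE B (Python) =====
-- def cal_col(row_num):
--     """calculate which rules num is in"""
--     rn = row_num//81
--     cn = row_num//9%9
--     nn = row_num%9
--     r1 = rn*9 + cn
--     r2 = rn*9 + nn + 81
--     r3 = cn*9 + nn + 162
--     r4 = rn//3*27 + cn//3*9 + nn + 243
--     return r1, r2, r3, r4
--
-- def cal_row(col):
--     """calculate which numbers rule col include (as a list)"""
--     if col < 81:
--         return [col*9+i for i in range(9)]
--     col -= 81
--     if col < 81: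
--         con = col//9*81 + col%9
--         return [con+i*9 for i in range(9)]
--     col -= 81
--     if col < 81:
--         return [col+81*i for i in range(9)]
--     col -= 81
--     con = col//27*243 + col//9%3*27 + col%9
--     return [con+i//3*81+i%3*9 for i in range(9)]
--
-- def make_boardr(moves):
--     """make a board based on moves(in row form)
--     return a turple of rows, columns, columns_head and board"""
--     board = moves[:]
--     removed_cols = set()
--     for nu in board:
--         removed_cols.update(cal_col(nu))
--     removed_cols &= set(range(324))
--     removed_rows = set()
--     for c in removed_cols:
--         removed_rows.update(cal_row(c))
--     columns_head = [9] * 324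
--     for r in removed_rows:
--         for c3 in cal_col(r):
--             columns_head[c3] -= 1
--     return set(range(729)) - removed_rows, set(range(324)) - removed_cols, columns_head, board
-- ===== Notes on version B (the rewrite author's own statement) =====
-- stated objective: alternative
-- what changed: The single triply-nested loop that mutates rows/columns/columns_head under membership guards is replaced by three independent passes: first compute the set of removed columns (union of cal_col over moves, intersected with range(324)), then the set of removed rows (union of cal_row over those columns), then derive rows and columns by plain set difference and columns_head by one batch of decrements per removed row.
import Mathlib
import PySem

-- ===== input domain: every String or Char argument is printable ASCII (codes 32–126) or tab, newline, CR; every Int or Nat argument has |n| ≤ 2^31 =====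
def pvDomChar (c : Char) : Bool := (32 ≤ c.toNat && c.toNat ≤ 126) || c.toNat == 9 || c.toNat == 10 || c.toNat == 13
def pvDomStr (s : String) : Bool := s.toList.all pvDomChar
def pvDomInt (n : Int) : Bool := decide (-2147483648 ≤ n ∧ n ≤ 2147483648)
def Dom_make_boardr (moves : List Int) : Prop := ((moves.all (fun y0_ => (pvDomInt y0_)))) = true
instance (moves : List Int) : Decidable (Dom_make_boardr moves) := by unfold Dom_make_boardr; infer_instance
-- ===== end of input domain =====

-- B replaces A's single guarded triply-nested mutating traversal with three flat passes
-- (removed-column set, removed-row set, batch decrements); alternative decomposition, no speed claim.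

-- ===== PORT A =====
-- shared module helper cal_col (used verbatim by both Pythons)
def calCol (row_num : Int) : List Int :=
  let rn := PySem.Int.floordiv row_num 81
  let cn := PySem.Int.mod (PySem.Int.floordiv row_num 9) 9
  let nn := PySem.Int.mod row_num 9
  [rn * 9 + cn, rn * 9 + nn + 81, cn * 9 + nn + 162,
   PySem.Int.floordiv rn 3 * 27 + PySem.Int.floordiv cn 3 * 9 + nn + 243]

-- shared module helper cal_row: the generator, materialised in the order it yields
def calRow (col : Int) : List Int :=
  if col < 81 then (PySem.List.pyRange 0 9 1).map (fun i => col * 9 + i)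
  else
    let col1 := col - 81
    if col1 < 81 then
      let con := PySem.Int.floordiv col1 9 * 81 + PySem.Int.mod col1 9
      (PySem.List.pyRange 0 9 1).map (fun i => con + i * 9)
    else
      let col2 := col1 - 81
      if col2 < 81 then (PySem.List.pyRange 0 9 1).map (fun i => col2 + 81 * i)
      else
        let col3 := col2 - 81
        let con := PySem.Int.floordiv col3 27 * 243 +
                   PySem.Int.mod (PySem.Int.floordiv col3 9) 3 * 27 + PySem.Int.mod col3 9
        (PySem.List.pyRange 0 9 1).map (fun i =>
          con + PySem.Int.floordiv i 3 * 81 + PySem.Int.mod i 3 * 9)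

-- columns_head[i] -= 1 ; hand port, exact for -len ≤ i < len (the only indices that occur
-- are cal_col of a row in range(729), hence 0..323)
def decAt (l : List Int) (i : Int) : List Int :=
  let j := if i < 0 then i + l.length else i
  l.set j.toNat (l.getD j.toNat 0 - 1)

-- 'for c3 in cal_col(r): columns_head[c3] -= 1'  (shared loop body of A's innermost loop and B's last pass)
def decCols (ch : List Int) (r : Int) : List Int := (calCol r).foldl decAt ch

-- body of A's 'for r in cal_row(c): …' (state: rows, columns_head)
def stepRowA (st : PySem.Set Int × List Int) (r : Int) : PySem.Set Int × List Int :=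
  if PySem.Set.contains st.1 r then (PySem.Set.discard st.1 r, decCols st.2 r) else st

-- body of A's 'for c in rc: …' (state: rows, columns, columns_head); 'columns.remove(c)'
-- is ported as discard, exact under the 'c in columns' guard
def stepColA (st : PySem.Set Int × PySem.Set Int × List Int) (c : Int) :
    PySem.Set Int × PySem.Set Int × List Int :=
  if PySem.Set.contains st.2.1 c then
    let cols := PySem.Set.discard st.2.1 c
    let p := (calRow c).foldl stepRowA (st.1, st.2.2)
    (p.1, cols, p.2)
  else st

def make_boardr (moves : List Int) : List Int × List Int × List Int × List Int :=
  let rows : PySem.Set Int := PySem.Set.ofList (PySem.List.pyRange 0 729 1)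
  let columns : PySem.Set Int := PySem.Set.ofList (PySem.List.pyRange 0 324 1)
  let columns_head : List Int := (PySem.List.pyRange 0 324 1).map (fun _ => (9 : Int))
  let board := moves
  let st := board.foldl (fun st nu => (calCol nu).foldl stepColA st) (rows, columns, columns_head)
  (st.1, st.2.1, st.2.2, board)

-- ===== PORT B =====
-- 'removed_rows = set(); for c in cs: removed_rows.update(cal_row(c))'
def rowsOf (cs : List Int) : PySem.Set Int :=
  cs.foldl (fun s c => PySem.Set.update s (calRow c)) PySem.Set.empty

def make_boardr_alt (moves : List Int) : List Int × List Int × List Int × List Int :=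
  let board := moves
  let removedCols0 : PySem.Set Int :=
    board.foldl (fun s nu => PySem.Set.update s (calCol nu)) PySem.Set.empty
  let removedCols := PySem.Set.inter removedCols0 (PySem.Set.ofList (PySem.List.pyRange 0 324 1))
  let removedRows := rowsOf removedCols
  let columns_head := removedRows.foldl decCols (PySem.List.pyRepeat [(9 : Int)] 324)
  (PySem.Set.diff (PySem.Set.ofList (PySem.List.pyRange 0 729 1)) removedRows,
   PySem.Set.diff (PySem.Set.ofList (PySem.List.pyRange 0 324 1)) removedCols,
   columns_head, board)

-- ===== PRECONDITION & SPEC =====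
def Spec_make_boardr (moves : List Int) (out : List Int × List Int × List Int × List Int) : Prop := out = make_boardr_alt moves
instance (moves : List Int) (out : List Int × List Int × List Int × List Int) : Decidable (Spec_make_boardr moves out) := by unfold Spec_make_boardr; infer_instance

-- ===== CLAIM (what is proved, stated in full; the proofs are below) =====
def Claim_equal_make_boardr : Prop := ∀ (moves : List Int), Dom_make_boardr moves → Spec_make_boardr moves (make_boardr moves)

-- ===== LEMMAS AND PROOFS =====

-- the initial columns_head, shared shape
def ch0 : List Int := (PySem.List.pyRange 0 324 1).map (fun _ => (9 : Int))

-- abstract state of A's fold after the removed-column list C has been processed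
def colStateS (C : List Int) : PySem.Set Int × PySem.Set Int × List Int :=
  ((PySem.List.pyRange 0 729 1).filter (fun x => !(rowsOf C).contains x),
   (PySem.List.pyRange 0 324 1).filter (fun x => !C.contains x),
   (rowsOf C).foldl decCols ch0)

-- how one candidate column updates the removed-column list
def addCol (C : List Int) (c : Int) : List Int :=
  if 0 ≤ c ∧ c < 324 then PySem.Set.add C c else C

set_option maxRecDepth 10000 in
lemma calRow_bounds_all :
    (PySem.List.pyRange 0 324 1).all (fun c => (calRow c).all (fun r => decide (0 ≤ r ∧ r < 729))) = true := by
  decide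

lemma calRow_bounds (c : Int) (h1 : 0 ≤ c) (h2 : c < 324) : ∀ r ∈ calRow c, 0 ≤ r ∧ r < 729 := by
  intro r hr
  have hc : c ∈ PySem.List.pyRange 0 324 1 := by rw [PySem.List.mem_pyRange_one]; omega
  have h3 := List.all_eq_true.mp calRow_bounds_all c hc
  have h4 := List.all_eq_true.mp h3 r hr
  exact of_decide_eq_true h4

lemma discard_of_not_mem (s : PySem.Set Int) (x : Int) (h : x ∉ s) : PySem.Set.discard s x = s := by
  rw [PySem.Set.discard]
  apply List.filter_eq_self.mpr
  intro a ha
  have : a ≠ x := fun he => h (he ▸ ha)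
  simp [this]

lemma filter_discard (s : PySem.Set Int) (x : Int) (p : Int → Bool) :
    (PySem.Set.discard s x).filter p = PySem.Set.discard (s.filter p) x := by
  simp [PySem.Set.discard, List.filter_filter, Bool.and_comm]

lemma foldRowA (rs : List Int) : ∀ (rows : PySem.Set Int) (ch : List Int),
    rs.foldl stepRowA (rows, ch)
    = (rows.filter (fun x => !rs.contains x),
       (PySem.Set.inter (PySem.Set.ofList rs) rows).foldl decCols ch) := by
  induction rs with
  | nil =>
    intro rows ch
    simp [PySem.Set.inter, PySem.Set.ofList, PySem.Set.empty]
  | cons r rs ih =>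
    intro rows ch
    simp only [List.foldl_cons, stepRowA]
    by_cases hr : r ∈ rows
    · rw [if_pos ((PySem.Set.contains_iff rows r).mpr hr)]
      rw [ih]
      simp only [PySem.Set.ofList_cons, PySem.Set.inter, PySem.Set.discard, Prod.mk.injEq]
      refine ⟨?_, ?_⟩
      · rw [List.filter_filter]
        apply List.filter_congr
        intro a _
        by_cases ha : a = r <;> simp [ha]
      · rw [List.filter_cons_of_pos (by simpa using ((PySem.Set.contains_iff rows r).mpr hr)),
            List.foldl_cons, List.filter_filter]
        congr 1
        apply List.filter_congr
        intro a _
        by_cases ha : a = r <;> simp [ha, List.mem_filter]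
    · rw [if_neg (fun h => hr ((PySem.Set.contains_iff rows r).mp h))]
      rw [ih]
      simp only [PySem.Set.ofList_cons, PySem.Set.inter, PySem.Set.discard, Prod.mk.injEq]
      refine ⟨?_, ?_⟩
      · apply List.filter_congr
        intro a haa
        have hne : a ≠ r := fun he => hr (he ▸ haa)
        simp [hne]
      · rw [List.filter_cons_of_neg (by simpa using (fun h => hr ((PySem.Set.contains_iff rows r).mp h))),
            List.filter_filter]
        congr 1
        apply List.filter_congr
        intro a _
        by_cases ha : a = r <;> simp [ha, hr]

lemma rowsOf_append (C : List Int) (c : Int) :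
    rowsOf (C ++ [c]) = PySem.Set.update (rowsOf C) (calRow c) := by
  simp [rowsOf, List.foldl_append, PySem.Set.update]

lemma stepColA_state (C : List Int) (c : Int) :
    stepColA (colStateS C) c = colStateS (addCol C c) := by
  by_cases hin : 0 ≤ c ∧ c < 324
  · by_cases hC : c ∈ C
    · have hmem : c ∉ (colStateS C).2.1 := by
        simp [colStateS, List.mem_filter, hC]
      rw [stepColA, if_neg (fun h => hmem ((PySem.Set.contains_iff _ c).mp h))]
      rw [addCol, if_pos hin, PySem.Set.add_of_mem hC]
    · have hcc : PySem.Set.contains (colStateS C).2.1 c = true := by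
        rw [PySem.Set.contains_iff]
        simp only [colStateS, List.mem_filter, PySem.List.mem_pyRange_one]
        refine ⟨⟨hin.1, hin.2⟩, by simp [hC]⟩
      rw [stepColA, if_pos hcc]
      rw [addCol, if_pos hin, PySem.Set.add_of_not_mem hC]
      simp only [foldRowA]
      simp only [colStateS, rowsOf_append, PySem.Set.inter, PySem.Set.discard, Prod.mk.injEq]
      refine ⟨?_, ?_, ?_⟩
      · simp only [List.filter_filter]
        apply List.filter_congr
        intro a _
        by_cases hu : a ∈ rowsOf C <;> by_cases hv : a ∈ calRow c <;>
          simp [hu, hv, PySem.Set.mem_update]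
      · simp only [List.filter_filter]
        apply List.filter_congr
        intro a _
        by_cases ha : a = c <;> by_cases hA : a ∈ C <;> simp [ha, hA]
      · rw [PySem.Set.update_eq_append_filter, List.foldl_append]
        refine congrArg (List.foldl decCols _) (List.filter_congr ?_)
        intro a ha
        rw [PySem.Set.mem_ofList] at ha
        have hb := calRow_bounds c hin.1 hin.2 a ha
        by_cases hu : a ∈ rowsOf C <;>
          simp [hu, List.mem_filter, PySem.List.mem_pyRange_one, hb.1, hb.2]
  · rw [stepColA, addCol, if_neg hin]
    rw [if_neg]
    intro h
    have := (PySem.Set.contains_iff _ c).mp h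
    simp only [colStateS, List.mem_filter, PySem.List.mem_pyRange_one] at this
    exact hin ⟨this.1.1, this.1.2⟩

lemma foldColA (L : List Int) : ∀ C : List Int,
    L.foldl stepColA (colStateS C) = colStateS (L.foldl addCol C) := by
  induction L with
  | nil => intro C; rfl
  | cons c L ih => intro C; simp only [List.foldl_cons, stepColA_state, ih]

lemma foldl_update_eq_update_flat (moves : List Int) (f : Int → List Int) :
    ∀ s : PySem.Set Int,
      moves.foldl (fun s nu => PySem.Set.update s (f nu)) s
      = PySem.Set.update s (moves.flatMap f) := by
  induction moves with
  | nil => intro s; simp [PySem.Set.update]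
  | cons m ms ih =>
    intro s
    simp only [List.foldl_cons, ih, List.flatMap_cons, PySem.Set.update_append]

lemma filter_ofList (L : List Int) (p : Int → Bool) :
    (PySem.Set.ofList L).filter p = PySem.Set.ofList (L.filter p) := by
  induction L with
  | nil => rfl
  | cons x L ih =>
    by_cases hp : p x = true
    · simp [PySem.Set.ofList_cons, hp, filter_discard, ih]
    · simp only [PySem.Set.ofList_cons, List.filter_cons]
      rw [if_neg (by simp [hp])]
      rw [filter_discard, ih, discard_of_not_mem _ _ (by
        intro hx
        rw [PySem.Set.mem_ofList] at hx
        exact hp (List.mem_filter.mp hx).2)]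
      rw [if_neg hp]

lemma removedCols_eq (L : List Int) :
    PySem.Set.inter (PySem.Set.ofList L) (PySem.Set.ofList (PySem.List.pyRange 0 324 1))
    = L.foldl addCol [] := by
  have h1 : L.foldl addCol []
      = PySem.Set.update [] (L.filter (fun c => decide (0 ≤ c ∧ c < 324))) := by
    have ha : addCol = fun (C : List Int) (c : Int) =>
        if 0 ≤ c ∧ c < 324 then PySem.Set.add C c else C := rfl
    rw [ha, PySem.List.foldl_ite_eq_foldl_filter]
    rfl
  rw [h1, PySem.Set.update_nil_left, ← filter_ofList, PySem.Set.inter]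
  apply List.filter_congr
  intro a _
  by_cases ha : 0 ≤ a ∧ a < 324 <;>
    simp [PySem.Set.mem_ofList, PySem.List.mem_pyRange_one, ha]

lemma ch0_eq : PySem.List.pyRepeat [(9 : Int)] 324 = ch0 := by
  rw [PySem.List.pyRepeat_singleton, ch0, List.map_const']
  simp [PySem.List.length_pyRange_one]

-- ===== VERDICT (by name: the statement is the Claim_ definition above) =====
lemma ofList_pyRange (a b : Int) :
    PySem.Set.ofList (PySem.List.pyRange a b 1) = PySem.List.pyRange a b 1 :=
  PySem.Set.ofList_eq_self_of_nodup _ (PySem.List.nodup_pyRange_one a b)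

lemma init_state :
    colStateS []
    = (PySem.Set.ofList (PySem.List.pyRange 0 729 1), PySem.Set.ofList (PySem.List.pyRange 0 324 1),
        (PySem.List.pyRange 0 324 1).map (fun _ => (9 : Int))) := by
  have h1 : (PySem.List.pyRange 0 729 1).filter (fun x => !(rowsOf []).contains x)
      = PySem.List.pyRange 0 729 1 := List.filter_eq_self.mpr (fun a _ => rfl)
  have h2 : (PySem.List.pyRange 0 324 1).filter (fun x => !(List.contains [] x))
      = PySem.List.pyRange 0 324 1 := List.filter_eq_self.mpr (fun a _ => rfl)
  rw [colStateS, ofList_pyRange, ofList_pyRange, h1, h2]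
  rfl

theorem make_boardr_spec : Claim_equal_make_boardr := by
  intro moves _
  show make_boardr moves = make_boardr_alt moves
  unfold make_boardr make_boardr_alt
  simp only []
  rw [← init_state]
  rw [show (fun st nu => List.foldl stepColA st (calCol nu)) = (fun st nu => (calCol nu).foldl stepColA st) from rfl]
  rw [← List.foldl_flatMap, foldColA]
  rw [foldl_update_eq_update_flat]
  rw [show (PySem.Set.empty : PySem.Set Int) = ([] : List Int) from rfl]
  rw [PySem.Set.update_nil_left, removedCols_eq, ch0_eq]
  simp only [colStateS, PySem.Set.diff, ofList_pyRange]
  rfl
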